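-- pv_equiv track=rewrite | github.com/Satyam2006chh/Disaster-Managment-Updated | app.py | get_initials
-- ===== SOURCE A (Python) =====
-- def get_initials(email):
--     try:
--         name = email.split("@")[0]
--         parts = name.replace('.', ' ').split()
--         initials = "".join([p[0].upper() for p in parts])
--         return initials[:2]  # max 2 letters
--     except:
--         return "U"
-- ===== SOURCE B (Python) =====
-- def get_initials(email):
--     # single early-stopping scan; no intermediate parts list
--     out = []
--     prev_sep = True
--     for c in email:
--         if c == '@':
--             break
--         sep = c == '.' or c.isspace()
--         if not sep and prev_sep:
--             out.append(c.upper())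
--             if len(out) == 2:
--                 break
--         prev_sep = sep
--     return ''.join(out)
-- ===== Notes on version B (the rewrite author's own statement) =====
-- stated objective: simpler
-- what changed: Replaces A's split/replace/split/join pipeline over intermediate lists by a single early-stopping left-to-right character scan with a previous-was-separator flag, stopping at the domain separator or once two initials are collected.
import Mathlib
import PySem

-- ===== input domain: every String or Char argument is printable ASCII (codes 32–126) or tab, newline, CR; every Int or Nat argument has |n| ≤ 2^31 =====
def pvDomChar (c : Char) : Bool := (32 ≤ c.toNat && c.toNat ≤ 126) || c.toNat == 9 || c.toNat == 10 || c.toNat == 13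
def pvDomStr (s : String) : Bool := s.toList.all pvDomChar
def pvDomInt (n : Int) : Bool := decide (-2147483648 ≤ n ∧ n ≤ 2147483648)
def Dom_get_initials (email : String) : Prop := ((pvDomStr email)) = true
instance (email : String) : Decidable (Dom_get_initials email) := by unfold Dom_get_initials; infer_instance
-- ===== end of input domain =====

-- B replaces A's split/replace/split/join pipeline by a single early-stopping scan; same return value.

-- ===== PORT A =====
-- the list comprehension [p[0].upper() for p in parts] (none = some p was empty, i.e. IndexError)
def pvUpperHeads? : List (List Char) → Option (List (List Char))
  | [] => some []
  | p :: rest =>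
    match PySem.List.pyGet? p 0, pvUpperHeads? rest with
    | some c, some r => some (PySem.Chars.upper [c] :: r)
    | _, _ => none

def get_initials (email : String) : String :=
  -- name = email.split("@")[0]
  match (PySem.Chars.split? email.toList ['@']).bind (fun parts => PySem.List.pyGet? parts 0) with
  | none => "U"
  | some name =>
    -- parts = name.replace('.', ' ').split()
    let parts := PySem.Chars.split₀ (PySem.Chars.replace name ['.'] [' '])
    -- initials = "".join([p[0].upper() for p in parts]); return initials[:2]
    match pvUpperHeads? parts with
    | none => "U"  -- the except branch (IndexError in the comprehension)
    | some initials =>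
      String.ofList (PySem.Chars.slice (PySem.Chars.join [] initials) none (some 2))

-- ===== PORT B =====
-- the scan: prev_sep flag, collect upper-cased word-initial chars, stop at '@' or at two letters
def pvAltLoop : List Char → Bool → List Char → List Char
  | [], _, out => out.reverse
  | c :: rest, prevSep, out =>
    if c = '@' then out.reverse
    else
      let sep := c = '.' || PySem.Chars.isspace c
      if !sep && prevSep then
        let out' := PySem.Chars.upperChar c :: out
        if out'.length = 2 then out'.reverse else pvAltLoop rest false out'
      else pvAltLoop rest sep out

def get_initials_alt (email : String) : String :=
  String.ofList (pvAltLoop email.toList true [])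

-- ===== PRECONDITION & SPEC =====
def Spec_get_initials (email : String) (out : String) : Prop := out = get_initials_alt email
instance (email : String) (out : String) : Decidable (Spec_get_initials email out) := by unfold Spec_get_initials; infer_instance

-- ===== CLAIM (what is proved, stated in full; the proofs are below) =====
def Claim_equal_get_initials : Prop := ∀ (email : String), Dom_get_initials email → Spec_get_initials email (get_initials email)

-- ===== LEMMAS AND PROOFS =====

-- the pieces email.split("@") produces (cur = reversed current piece)
def pvPieces : List Char → List Char → List (List Char)
  | [], cur => [cur.reverse]
  | c :: r, cur => if c = '@' then cur.reverse :: pvPieces r [] else pvPieces r (c :: cur)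

-- the words name.split() produces (cur = reversed current word)
def pvWords : List Char → List Char → List (List Char)
  | [], cur => if cur.isEmpty then [] else [cur.reverse]
  | c :: r, cur =>
    if PySem.Chars.isspace c then
      if cur.isEmpty then pvWords r [] else cur.reverse :: pvWords r []
    else pvWords r (c :: cur)

-- first characters of the whitespace-separated words
def pvFirsts : List Char → Bool → List Char
  | [], _ => []
  | c :: r, prev =>
    if PySem.Chars.isspace c then pvFirsts r true
    else if prev then c :: pvFirsts r false else pvFirsts r false

-- B-side firsts, with '.' also counted as separator
def pvFirstsB : List Char → Bool → List Char
  | [], _ => []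
  | c :: r, prev =>
    if c = '.' || PySem.Chars.isspace c then pvFirstsB r true
    else if prev then c :: pvFirstsB r false else pvFirstsB r false

def pvDot (c : Char) : Char := if c = '.' then ' ' else c

theorem pv_splitOn_go (fuel : Nat) (l cur : List Char) (acc : List (List Char)) (h : l.length < fuel) :
    PySem.Chars.splitOn.go ['@'] fuel l cur acc = acc.reverse ++ pvPieces l cur := by
  induction fuel generalizing l cur acc with
  | zero => omega
  | succ n ih =>
    cases l with
    | nil => simp [PySem.Chars.splitOn.go, pvPieces]
    | cons c r =>
      simp only [PySem.Chars.splitOn.go]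
      by_cases hc : c = '@'
      · subst hc
        have hpre : List.isPrefixOf ['@'] ('@' :: r) = true := by simp [List.isPrefixOf]
        rw [hpre]
        simp only [if_true]
        rw [ih]
        · simp [pvPieces]
        · simpa using Nat.lt_of_succ_lt_succ (by simpa using h)
      · have hpre : List.isPrefixOf ['@'] (c :: r) = false := by
          simp [List.isPrefixOf]
          intro hh; exact absurd hh.symm hc
        rw [hpre]
        simp only [Bool.false_eq_true, if_false]
        rw [ih]
        · simp [pvPieces, hc]
        · simpa using Nat.lt_of_succ_lt_succ (by simpa using h)

theorem pv_pieces_head (l : List Char) (cur : List Char) :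
    (pvPieces l cur).head? = some (cur.reverse ++ l.takeWhile (· ≠ '@')) := by
  induction l generalizing cur with
  | nil => simp [pvPieces]
  | cons c r ih =>
    by_cases hc : c = '@'
    · subst hc; simp [pvPieces, List.takeWhile]
    · simp [pvPieces, hc, ih]

theorem pv_replace_go (fuel : Nat) (l acc : List Char) (h : l.length ≤ fuel) :
    PySem.Chars.replace.go ['.'] [' '] fuel l acc = acc.reverse ++ l.map pvDot := by
  induction fuel generalizing l acc with
  | zero =>
    have : l = [] := by cases l <;> simp_all
    subst this; simp [PySem.Chars.replace.go]
  | succ n ih =>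
    cases l with
    | nil => simp [PySem.Chars.replace.go]
    | cons c t =>
      simp only [PySem.Chars.replace.go]
      by_cases hc : c = '.'
      · subst hc
        have hpre : List.isPrefixOf ['.'] ('.' :: t) = true := by simp [List.isPrefixOf]
        rw [hpre]; simp only [if_true]
        rw [ih]
        · simp [pvDot]
        · simpa using Nat.le_of_succ_le_succ (by simpa using h)
      · have hpre : List.isPrefixOf ['.'] (c :: t) = false := by
          simp [List.isPrefixOf]; intro hh; exact absurd hh.symm hc
        rw [hpre]; simp only [Bool.false_eq_true, if_false]
        rw [ih]
        · simp [pvDot, hc]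
        · simpa using Nat.le_of_succ_le_succ (by simpa using h)

theorem pv_split₀_go (ds cur : List Char) (acc : List (List Char)) :
    PySem.Chars.split₀.go ds cur acc = acc.reverse ++ pvWords ds cur := by
  induction ds generalizing cur acc with
  | nil =>
    simp only [PySem.Chars.split₀.go, pvWords]
    by_cases hcur : cur.isEmpty <;> simp [hcur]
  | cons c r ih =>
    simp only [PySem.Chars.split₀.go, pvWords]
    by_cases hs : PySem.Chars.isspace c
    · simp only [hs, if_true]
      by_cases hcur : cur.isEmpty
      · simp [hcur, ih]
      · simp only [hcur, Bool.false_eq_true, if_false]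
        rw [ih]; simp
    · simp [hs, ih]

theorem pv_heads (ds : List Char) :
    (pvUpperHeads? (pvWords ds []) = some ((pvFirsts ds true).map (fun c => [PySem.Chars.upperChar c]))) ∧
    (∀ cur c, pvUpperHeads? (pvWords ds (cur ++ [c])) =
        some ((c :: pvFirsts ds false).map (fun c => [PySem.Chars.upperChar c]))) := by
  induction ds with
  | nil =>
    constructor
    · simp [pvWords, pvUpperHeads?, pvFirsts]
    · intro cur c
      simp [pvWords, pvUpperHeads?, pvFirsts, PySem.Chars.upper]
  | cons d r ih =>
    by_cases hs : PySem.Chars.isspace d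
    · constructor
      · simp [pvWords, hs, pvFirsts, ih.1]
      · intro cur c
        simp only [pvWords, hs, if_true]
        have hne : (cur ++ [c]).isEmpty = false := by simp
        simp only [hne, Bool.false_eq_true, if_false]
        simp [pvUpperHeads?, ih.1, pvFirsts, hs, PySem.Chars.upper]
    · constructor
      · have := ih.2 [] d
        simp only [List.nil_append] at this
        simp [pvWords, hs, pvFirsts, this]
      · intro cur c
        have := ih.2 (d :: cur) c
        simp only [pvWords, hs]
        simpa [pvFirsts, hs] using this

theorem pv_firstsB_eq (cs : List Char) (prev : Bool) :
    pvFirstsB cs prev = pvFirsts (cs.map pvDot) prev := by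
  induction cs generalizing prev with
  | nil => simp [pvFirstsB, pvFirsts]
  | cons c r ih =>
    by_cases hc : c = '.'
    · subst hc
      have : PySem.Chars.isspace ' ' = true := by decide
      simp [pvFirstsB, pvFirsts, pvDot, this, ih]
    · by_cases hs : PySem.Chars.isspace c
      · simp [pvFirstsB, pvFirsts, pvDot, hc, hs, ih]
      · cases prev <;> simp [pvFirstsB, pvFirsts, pvDot, hc, hs, ih]

theorem pv_altLoop_takeWhile (cs : List Char) (prev : Bool) (out : List Char) :
    pvAltLoop cs prev out = pvAltLoop (cs.takeWhile (· ≠ '@')) prev out := by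
  induction cs generalizing prev out with
  | nil => simp
  | cons c r ih =>
    by_cases hc : c = '@'
    · subst hc; simp [pvAltLoop, List.takeWhile]
    · simp only [List.takeWhile_cons]
      simp only [hc, ne_eq, not_false_eq_true, decide_true, if_true]
      simp only [pvAltLoop, hc, if_false]
      split_ifs <;> simp [ih]

theorem pv_altCore (cs : List Char) (prev : Bool) (out : List Char)
    (hno : ∀ c ∈ cs, c ≠ '@') (hlen : out.length < 2) :
    pvAltLoop cs prev out = (out.reverse ++ (pvFirstsB cs prev).map PySem.Chars.upperChar).take 2 := by
  induction cs generalizing prev out with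
  | nil =>
    rw [List.take_of_length_le (by simpa [pvFirstsB] using hlen.le)]
    simp [pvAltLoop, pvFirstsB]
  | cons c r ih =>
    have hc : c ≠ '@' := hno c (by simp)
    have hno' : ∀ x ∈ r, x ≠ '@' := fun x hx => hno x (by simp [hx])
    simp only [pvAltLoop, hc, if_false]
    by_cases hsep : (c = '.' || PySem.Chars.isspace c) = true
    · simp only [hsep, Bool.not_true, Bool.false_and, Bool.false_eq_true, if_false]
      rw [ih _ _ hno' hlen]
      have : pvFirstsB (c :: r) prev = pvFirstsB r true := by
        simp [pvFirstsB, hsep]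
      rw [this]
    · simp only [hsep, Bool.not_false]
      have hsep' : (c = '.' || PySem.Chars.isspace c) = false := by simpa using hsep
      have hfb : pvFirstsB (c :: r) prev = if prev then c :: pvFirstsB r false else pvFirstsB r false := by
        simp [pvFirstsB, hsep']
      cases prev with
      | false =>
        simp only [Bool.and_false, Bool.false_eq_true, if_false]
        rw [ih _ _ hno' hlen, hfb]
        simp
      | true =>
        simp only [Bool.and_true] at *
        simp only [hsep', if_true]
        rw [hfb]
        by_cases h2 : (PySem.Chars.upperChar c :: out).length = 2
        · simp only [h2, if_true]
          have hout : out.length = 1 := by simpa using h2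
          obtain ⟨a, ha⟩ : ∃ a, out = [a] := by
            cases out with
            | nil => simp at hout
            | cons a t => cases t with
              | nil => exact ⟨a, rfl⟩
              | cons b u => simp at hout
          subst ha
          simp
        · have hlen' : (PySem.Chars.upperChar c :: out).length < 2 := by
            have : out.length = 0 := by
              simp only [List.length_cons] at h2; omega
            simp [this]
          simp only [h2, if_false]
          rw [ih _ _ hno' hlen']
          have : out.length = 0 := by
            simp only [List.length_cons] at h2; omega
          have hout : out = [] := by simpa using List.eq_nil_of_length_eq_zero this
          subst hout
          simp

theorem pv_pyGet?_zero {α : Type} (xs : List α) : PySem.List.pyGet? xs 0 = xs.head? := by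
  cases xs <;> simp [PySem.List.pyGet?, PySem.List.pyIdx?]

-- ===== VERDICT (by name: the statement is the Claim_ definition above) =====
theorem get_initials_spec : Claim_equal_get_initials := by
  intro email _
  unfold Spec_get_initials get_initials get_initials_alt
  have hscrut : (PySem.Chars.split? email.toList ['@']).bind (fun parts => PySem.List.pyGet? parts 0)
      = some (email.toList.takeWhile (· ≠ '@')) := by
    have hsplit : PySem.Chars.split? email.toList ['@'] = some (PySem.Chars.splitOn email.toList ['@']) := by
      simp [PySem.Chars.split?]
    have hgo : PySem.Chars.splitOn email.toList ['@'] = pvPieces email.toList [] := by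
      rw [show PySem.Chars.splitOn email.toList ['@']
            = PySem.Chars.splitOn.go ['@'] (email.toList.length + 1) email.toList [] [] from rfl]
      rw [pv_splitOn_go _ _ _ _ (by omega)]
      simp
    rw [hsplit, Option.bind_some, hgo, pv_pyGet?_zero, pv_pieces_head]
    simp
  rw [hscrut]
  set name := email.toList.takeWhile (· ≠ '@') with hname
  have hrepl : PySem.Chars.replace name ['.'] [' '] = name.map pvDot := by
    rw [show PySem.Chars.replace name ['.'] [' ']
          = PySem.Chars.replace.go ['.'] [' '] name.length name [] from rfl]
    rw [pv_replace_go _ _ _ (le_refl _)]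
    simp
  have hwords : PySem.Chars.split₀ (name.map pvDot) = pvWords (name.map pvDot) [] := by
    rw [show PySem.Chars.split₀ (name.map pvDot) = PySem.Chars.split₀.go (name.map pvDot) [] [] from rfl]
    rw [pv_split₀_go]
    simp
  simp only [hrepl, hwords, (pv_heads (name.map pvDot)).1]
  have hjoin : PySem.Chars.join [] ((pvFirsts (name.map pvDot) true).map (fun c => [PySem.Chars.upperChar c]))
      = (pvFirsts (name.map pvDot) true).map PySem.Chars.upperChar := by
    have := PySem.Chars.join_nil_singletons ((pvFirsts (name.map pvDot) true).map PySem.Chars.upperChar)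
    simpa [List.map_map] using this
  rw [hjoin]
  have hslice : PySem.Chars.slice ((pvFirsts (name.map pvDot) true).map PySem.Chars.upperChar) none (some 2)
      = ((pvFirsts (name.map pvDot) true).map PySem.Chars.upperChar).take 2 := by
    rw [PySem.Chars.slice_eq_listSlice, PySem.List.slice_to _ (by norm_num)]
    rfl
  rw [hslice]
  have hB : pvAltLoop email.toList true []
      = ((pvFirstsB name true).map PySem.Chars.upperChar).take 2 := by
    rw [pv_altLoop_takeWhile, ← hname]
    have hno : ∀ c ∈ name, c ≠ '@' := by
      intro c hc
      simpa using List.mem_takeWhile_imp hc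
    rw [pv_altCore name true [] hno (by simp)]
    simp
  rw [hB, pv_firstsB_eq]
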